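-- pv_equiv track=rewrite | github.com/lindeb2/Apollo | PanTest/Test.py | filter_C_closest_to_middle_right
-- ===== SOURCE A (Python) =====
-- import math
--
-- def filter_C_closest_to_middle_right(candidates, value):
--     """
--     Priority C: Low values prefers middle (right). (Translates to musically high parts.)
--     """
--     n = len(candidates[0])
--     target_index = math.ceil((n - 1) / 2)
--
--     best_dist = float('inf')
--     b_d_good_side = False
--     scored_candidates = []
--
--     for perm in candidates:
--         index_of_val = perm.index(value)
--         good_side = index_of_val >= target_index
--         dist = abs(index_of_val - target_index)
--
--         if dist < best_dist:
--             best_dist = dist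
--             b_d_good_side = good_side
--             scored_candidates = [perm]
--         elif dist == best_dist:
--             if b_d_good_side:
--                 if good_side:
--                     scored_candidates.append(perm)
--             else:
--                 if not good_side:
--                     scored_candidates.append(perm)
--                 if good_side:
--                     scored_candidates = [perm]
--                     b_d_good_side = True
--
--     return scored_candidates
-- ===== SOURCE B (Python) =====
-- import math
--
-- def filter_C_closest_to_middle_right(candidates, value):
--     n = len(candidates[0])
--     target_index = math.ceil((n - 1) / 2)
--     keys = []
--     for perm in candidates:
--         i = perm.index(value)
--         keys.append((abs(i - target_index), 0 if i >= target_index else 1))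
--     best = min(keys)
--     return [perm for perm, k in zip(candidates, keys) if k == best]
-- ===== Notes on version B (the rewrite author's own statement) =====
-- stated objective: simpler
-- what changed: Replaces A's stateful running-best loop with four-way tie-break branching by a key-computation pass ((distance, side-penalty) per candidate), a single lexicographic min, and a filter keeping the candidates whose key equals the minimum.
import Mathlib
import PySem

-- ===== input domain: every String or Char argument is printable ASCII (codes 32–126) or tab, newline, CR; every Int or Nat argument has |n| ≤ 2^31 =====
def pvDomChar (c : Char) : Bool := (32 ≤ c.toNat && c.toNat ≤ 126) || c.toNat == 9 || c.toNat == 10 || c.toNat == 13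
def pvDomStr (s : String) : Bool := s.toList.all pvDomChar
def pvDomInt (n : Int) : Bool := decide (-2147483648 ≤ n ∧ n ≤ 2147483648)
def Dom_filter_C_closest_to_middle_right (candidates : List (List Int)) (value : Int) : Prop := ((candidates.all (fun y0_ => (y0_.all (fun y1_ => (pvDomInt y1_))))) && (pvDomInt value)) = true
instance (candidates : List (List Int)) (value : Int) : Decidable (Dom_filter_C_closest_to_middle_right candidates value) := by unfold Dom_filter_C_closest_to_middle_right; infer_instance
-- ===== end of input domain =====

-- B replaces A's stateful running-best loop (with its four-way tie-break branching) by a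
-- key pass + lexicographic min + filter; objective: simpler.

-- ===== PORT A =====
-- A's loop state: (best_dist : Option Int with none = float('inf'), b_d_good_side, scored_candidates).
def fcStepA (value tgt : Int) (st : Option Int × Bool × List (List Int)) (perm : List Int) :
    Option Int × Bool × List (List Int) :=
  -- index_of_val = perm.index(value); Python raises ValueError when value ∉ perm — excluded by Pre_
  let idx : Int := (((PySem.List.index? perm value).getD 0 : Nat) : Int)
  let good : Bool := decide (tgt ≤ idx)
  let dist : Int := |idx - tgt|
  match st with
  | (none, _, _) => (some dist, good, [perm])       -- dist < float('inf')
  | (some bd, gs, sc) =>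
    if dist < bd then (some dist, good, [perm])
    else if dist = bd then
      if gs then (if good then (some bd, gs, sc ++ [perm]) else (some bd, gs, sc))
      else if good then (some bd, true, [perm])
      else (some bd, gs, sc ++ [perm])
    else (some bd, gs, sc)

def filter_C_closest_to_middle_right (candidates : List (List Int)) (value : Int) : List (List Int) :=
  match candidates with
  | [] => []            -- Python raises IndexError on candidates[0]; excluded by Pre_
  | c0 :: _ =>
    let n : Int := (c0.length : Int)
    -- math.ceil((n-1)/2) = -((-(n-1)) // 2); exact on ints of this size
    let tgt : Int := -(PySem.Int.floordiv (-(n - 1)) 2)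
    (candidates.foldl (fcStepA value tgt) (none, false, [])).2.2

-- ===== PORT B =====
-- Python's '<' on int pairs is lexicographic
def lexLt (a b : Int × Int) : Bool := decide (a.1 < b.1 ∨ (a.1 = b.1 ∧ a.2 < b.2))

def filter_C_closest_to_middle_right_alt (candidates : List (List Int)) (value : Int) : List (List Int) :=
  match candidates with
  | [] => []            -- Python raises IndexError on candidates[0]; excluded by Pre_
  | c0 :: rest =>
    let n : Int := (c0.length : Int)
    let tgt : Int := -(PySem.Int.floordiv (-(n - 1)) 2)   -- math.ceil((n-1)/2)
    let key : List Int → Int × Int := fun perm =>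
      let i : Int := (((PySem.List.index? perm value).getD 0 : Nat) : Int)
      (|i - tgt|, if tgt ≤ i then (0 : Int) else 1)
    let keys := (c0 :: rest).map key
    -- min(keys): running lexicographic min keeping the first extremal value
    let best := (rest.map key).foldl (fun acc k => if lexLt k acc then k else acc) (key c0)
    (((c0 :: rest).zip keys).filter (fun pk => decide (pk.2 = best))).map Prod.fst

-- ===== PRECONDITION & SPEC =====
-- Pre_ excludes exactly the inputs where the Pythons raise: empty candidates (IndexError on
-- candidates[0]) and a perm not containing value (ValueError from perm.index(value)).
def Pre_filter_C_closest_to_middle_right (candidates : List (List Int)) (value : Int) : Prop :=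
  candidates ≠ [] ∧ ∀ perm ∈ candidates, value ∈ perm
instance (candidates : List (List Int)) (value : Int) : Decidable (Pre_filter_C_closest_to_middle_right candidates value) := by unfold Pre_filter_C_closest_to_middle_right; infer_instance
def pvWitness_filter_C_closest_to_middle_right : List (List Int) × Int := ([[1, 2, 3], [3, 2, 1], [2, 1, 3]], 2)

def Spec_filter_C_closest_to_middle_right (candidates : List (List Int)) (value : Int) (out : List (List Int)) : Prop := out = filter_C_closest_to_middle_right_alt candidates value
instance (candidates : List (List Int)) (value : Int) (out : List (List Int)) : Decidable (Spec_filter_C_closest_to_middle_right candidates value out) := by unfold Spec_filter_C_closest_to_middle_right; infer_instance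

-- ===== CLAIM (what is proved, stated in full; the proofs are below) =====
def Claim_equal_filter_C_closest_to_middle_right : Prop := ∀ (candidates : List (List Int)) (value : Int), Dom_filter_C_closest_to_middle_right candidates value → Pre_filter_C_closest_to_middle_right candidates value → Spec_filter_C_closest_to_middle_right candidates value (filter_C_closest_to_middle_right candidates value)

-- ===== LEMMAS AND PROOFS =====

-- The shared per-candidate key: (distance to target, 0 on the good side else 1).
def fcKey (value tgt : Int) (perm : List Int) : Int × Int :=
  (|(((PySem.List.index? perm value).getD 0 : Nat) : Int) - tgt|,
   if tgt ≤ (((PySem.List.index? perm value).getD 0 : Nat) : Int) then (0 : Int) else 1)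

def kmin (acc k : Int × Int) : Int × Int := if lexLt k acc then k else acc

def lexLe (a b : Int × Int) : Prop := a.1 < b.1 ∨ (a.1 = b.1 ∧ a.2 ≤ b.2)

lemma lexLe_refl (a : Int × Int) : lexLe a a := by simp [lexLe]

lemma lexLe_trans {a b c : Int × Int} (h1 : lexLe a b) (h2 : lexLe b c) : lexLe a c := by
  rcases h1 with h | ⟨h, h'⟩ <;> rcases h2 with g | ⟨g, g'⟩ <;> (simp [lexLe]; omega)

lemma kmin_le_left (a k : Int × Int) : lexLe (kmin a k) a := by
  unfold kmin lexLt
  split_ifs with h <;> simp [lexLe] at * <;> omega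

lemma foldl_kmin_le (ks : List (Int × Int)) : ∀ a, lexLe (ks.foldl kmin a) a := by
  induction ks with
  | nil => intro a; exact lexLe_refl a
  | cons k t ih =>
    intro a
    exact lexLe_trans (ih (kmin a k)) (kmin_le_left a k)

lemma lexLe_ne_of_lt {a b c : Int × Int} (h1 : lexLe a b) (h2 : lexLt b c = true) : a ≠ c := by
  intro he
  subst he
  simp [lexLt] at h2
  rcases h1 with h | ⟨h, h'⟩ <;> rcases h2 with g | ⟨g, g'⟩ <;> omega

lemma lexLt_of_not_of_ne {a b : Int × Int} (h : lexLt a b = false) (hne : a ≠ b) : lexLt b a = true := by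
  obtain ⟨a1, a2⟩ := a
  obtain ⟨b1, b2⟩ := b
  simp [lexLt, Prod.ext_iff] at *
  omega

-- characterization of A's step in terms of the key
lemma stepA_char (value tgt : Int) (bd : Int) (gs : Bool) (sc : List (List Int)) (perm : List Int) :
    fcStepA value tgt (some bd, gs, sc) perm =
      (if lexLt (fcKey value tgt perm) (bd, if gs then 0 else 1) then
        (some (fcKey value tgt perm).1, decide ((fcKey value tgt perm).2 = 0), [perm])
       else if fcKey value tgt perm = (bd, if gs then 0 else 1) then (some bd, gs, sc ++ [perm])
       else (some bd, gs, sc)) := by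
  unfold fcStepA fcKey lexLt
  cases gs <;> simp only [Bool.false_eq_true, if_true, if_false] <;>
    by_cases h1 : tgt ≤ (((PySem.List.index? perm value).getD 0 : Nat) : Int) <;>
    split_ifs <;> simp_all [Prod.ext_iff] <;> omega

-- main loop invariant: A's fold from a concrete best equals min + filter of the remaining list
lemma loop_inv (value tgt : Int) (l : List (List Int)) :
    ∀ (bd : Int) (gs : Bool) (sc : List (List Int)),
    l.foldl (fcStepA value tgt) (some bd, gs, sc) =
      (some ((l.map (fcKey value tgt)).foldl kmin (bd, if gs then 0 else 1)).1,
       decide (((l.map (fcKey value tgt)).foldl kmin (bd, if gs then 0 else 1)).2 = 0),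
       (if (l.map (fcKey value tgt)).foldl kmin (bd, if gs then 0 else 1) = (bd, if gs then 0 else 1) then sc else []) ++
         l.filter (fun p => decide (fcKey value tgt p = (l.map (fcKey value tgt)).foldl kmin (bd, if gs then 0 else 1)))) := by
  induction l with
  | nil =>
    intro bd gs sc
    cases gs <;> simp [List.foldl, kmin]
  | cons x t ih =>
    intro bd gs sc
    have hstep := stepA_char value tgt bd gs sc x
    by_cases hlt : lexLt (fcKey value tgt x) (bd, if gs then 0 else 1) = true
    · -- strictly better: reset
      rw [List.foldl_cons, hstep, if_pos hlt]
      have hkx : (fcKey value tgt x).2 = 0 ∨ (fcKey value tgt x).2 = 1 := by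
        simp only [fcKey]; split_ifs <;> simp
      have hgs : (fcKey value tgt x).1 = (fcKey value tgt x).1 ∧
          ((if decide ((fcKey value tgt x).2 = 0) = true then (0:Int) else 1) = (fcKey value tgt x).2) := by
        rcases hkx with h | h <;> simp [h]
      rw [ih (fcKey value tgt x).1 (decide ((fcKey value tgt x).2 = 0)) [x]]
      have hK : ((fcKey value tgt x).1, if decide ((fcKey value tgt x).2 = 0) = true then (0:Int) else 1) = fcKey value tgt x := by
        exact Prod.ext hgs.1 hgs.2
      rw [hK]
      have hfold : (List.map (fcKey value tgt) (x :: t)).foldl kmin (bd, if gs then 0 else 1)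
          = (List.map (fcKey value tgt) t).foldl kmin (fcKey value tgt x) := by
        simp [List.foldl_cons, kmin, hlt]
      rw [hfold]
      -- final min ≠ initial key (it is ≤ key x < initial key)
      have hle := foldl_kmin_le (List.map (fcKey value tgt) t) (fcKey value tgt x)
      have hne : (List.map (fcKey value tgt) t).foldl kmin (fcKey value tgt x) ≠ (bd, if gs then 0 else 1) :=
        lexLe_ne_of_lt hle hlt
      obtain ⟨M, hM⟩ : ∃ M, (List.map (fcKey value tgt) t).foldl kmin (fcKey value tgt x) = M := ⟨_, rfl⟩
      rw [hM] at hne ⊢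
      rw [if_neg hne]
      by_cases h : fcKey value tgt x = M
      · simp [List.filter_cons, h]
      · simp [List.filter_cons, h, Ne.symm h]
    · rw [List.foldl_cons, hstep, if_neg hlt]
      have hfold : (List.map (fcKey value tgt) (x :: t)).foldl kmin (bd, if gs then 0 else 1)
          = (List.map (fcKey value tgt) t).foldl kmin (bd, if gs then 0 else 1) := by
        simp [List.foldl_cons, kmin, hlt]
      by_cases heq : fcKey value tgt x = (bd, if gs then 0 else 1)
      · -- equal key: append
        rw [if_pos heq, ih bd gs (sc ++ [x]), hfold]
        by_cases h : (List.map (fcKey value tgt) t).foldl kmin (bd, if gs then 0 else 1) = (bd, if gs then 0 else 1)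
        · have hx : fcKey value tgt x = (List.map (fcKey value tgt) t).foldl kmin (bd, if gs then 0 else 1) :=
            heq.trans h.symm
          simp [List.filter_cons, h, hx]
        · have hx : fcKey value tgt x ≠ (List.map (fcKey value tgt) t).foldl kmin (bd, if gs then 0 else 1) := by
            rw [heq]; exact Ne.symm h
          simp [List.filter_cons, h, hx]
      · -- strictly worse: unchanged; final min ≠ key x
        rw [if_neg heq, ih bd gs sc, hfold]
        have hle := foldl_kmin_le (List.map (fcKey value tgt) t) (bd, if gs then 0 else 1)
        have hne : fcKey value tgt x ≠ (List.map (fcKey value tgt) t).foldl kmin (bd, if gs then 0 else 1) :=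
          (lexLe_ne_of_lt hle (lexLt_of_not_of_ne (by simpa using hlt) heq)).symm
        simp [List.filter_cons, hne]

-- zip-with-keys filter = direct filter
lemma zip_filter_map (value tgt : Int) (best : Int × Int) (l : List (List Int)) :
    ∀ pre : List ((List Int) × (Int × Int)),
    (((pre ++ l.zip (l.map (fcKey value tgt))).filter (fun pk => decide (pk.2 = best))).map Prod.fst) =
      (pre.filter (fun pk => decide (pk.2 = best))).map Prod.fst ++
        l.filter (fun p => decide (fcKey value tgt p = best)) := by
  induction l with
  | nil => intro pre; simp
  | cons x t ih =>
    intro pre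
    have : (pre ++ (x :: t).zip ((x :: t).map (fcKey value tgt))) =
        (pre ++ [(x, fcKey value tgt x)]) ++ t.zip (t.map (fcKey value tgt)) := by simp
    rw [this, ih]
    simp [List.filter_cons, List.filter_append]
    split_ifs <;> simp

theorem filter_C_closest_to_middle_right_spec : Claim_equal_filter_C_closest_to_middle_right := by
  intro candidates value _ _
  unfold Spec_filter_C_closest_to_middle_right
  cases candidates with
  | nil => rfl
  | cons c0 rest =>
    have hAdef : filter_C_closest_to_middle_right (c0 :: rest) value =
        (List.foldl (fcStepA value (-(PySem.Int.floordiv (-((c0.length : Int) - 1)) 2))) (none, false, []) (c0 :: rest)).2.2 := rfl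
    have hBdef : filter_C_closest_to_middle_right_alt (c0 :: rest) value =
        (((c0 :: rest).zip ((c0 :: rest).map (fcKey value (-(PySem.Int.floordiv (-((c0.length : Int) - 1)) 2))))).filter
          (fun pk => decide (pk.2 = (rest.map (fcKey value (-(PySem.Int.floordiv (-((c0.length : Int) - 1)) 2)))).foldl kmin
            (fcKey value (-(PySem.Int.floordiv (-((c0.length : Int) - 1)) 2)) c0)))).map Prod.fst := rfl
    rw [hAdef, hBdef]
    generalize -(PySem.Int.floordiv (-((c0.length : Int) - 1)) 2) = tgt
    -- A's first step from the initial (inf) state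
    have hfirst : fcStepA value tgt (none, false, []) c0 =
        (some (fcKey value tgt c0).1, decide ((fcKey value tgt c0).2 = 0), [c0]) := by
      unfold fcStepA
      simp only [fcKey]
      by_cases h : tgt ≤ (((PySem.List.index? c0 value).getD 0 : Nat) : Int) <;> simp [h]
    have hK0 : ((fcKey value tgt c0).1, if decide ((fcKey value tgt c0).2 = 0) = true then (0:Int) else 1)
        = fcKey value tgt c0 := by
      simp only [fcKey]; split_ifs <;> simp_all
    have hA : (List.foldl (fcStepA value tgt) (none, false, []) (c0 :: rest)).2.2 =
        (if (rest.map (fcKey value tgt)).foldl kmin (fcKey value tgt c0) = fcKey value tgt c0 then [c0] else []) ++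
          rest.filter (fun p => decide (fcKey value tgt p = (rest.map (fcKey value tgt)).foldl kmin (fcKey value tgt c0))) := by
      rw [List.foldl_cons, hfirst,
        loop_inv value tgt rest (fcKey value tgt c0).1 (decide ((fcKey value tgt c0).2 = 0)) [c0]]
      rw [hK0]
    rw [hA]
    have hB := zip_filter_map value tgt ((rest.map (fcKey value tgt)).foldl kmin (fcKey value tgt c0)) (c0 :: rest) []
    simp only [List.nil_append, List.filter_nil, List.map_nil] at hB
    rw [hB]
    obtain ⟨M, hM⟩ : ∃ M, (rest.map (fcKey value tgt)).foldl kmin (fcKey value tgt c0) = M := ⟨_, rfl⟩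
    rw [hM]
    by_cases h : fcKey value tgt c0 = M
    · simp [List.filter_cons, h]
    · simp [List.filter_cons, h, Ne.symm h]
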